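-- pv_equiv track=rewrite | github.com/Ankit-Bhatia/AutoMapper | scraper_agent/comparator.py | _opcode_stats
-- ===== SOURCE A (Python) =====
-- def _opcode_stats(opcodes: list[tuple[str, int, int, int, int]]) -> dict[str, int]:
--     stats = {"equal": 0, "replace": 0, "delete": 0, "insert": 0}
--     for tag, i1, i2, j1, j2 in opcodes:
--         if tag not in stats:
--             continue
--         if tag == "equal":
--             stats[tag] += (i2 - i1)
--         elif tag == "replace":
--             stats[tag] += max(i2 - i1, j2 - j1)
--         else:
--             stats[tag] += (i2 - i1) if tag == "delete" else (j2 - j1)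
--     return stats
-- ===== SOURCE B (Python) =====
-- def _opcode_stats(opcodes):
--     return {
--         "equal":   sum(i2 - i1 for t, i1, i2, j1, j2 in opcodes if t == "equal"),
--         "replace": sum(max(i2 - i1, j2 - j1) for t, i1, i2, j1, j2 in opcodes if t == "replace"),
--         "delete":  sum(i2 - i1 for t, i1, i2, j1, j2 in opcodes if t == "delete"),
--         "insert":  sum(j2 - j1 for t, i1, i2, j1, j2 in opcodes if t == "insert"),
--     }
-- ===== Notes on version B (the rewrite author's own statement) =====
-- stated objective: simpler
-- what changed: Replaces the single branching pass that mutates a dict with a dict literal whose four values are each computed by its own independent filtered sum.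
import Mathlib
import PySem

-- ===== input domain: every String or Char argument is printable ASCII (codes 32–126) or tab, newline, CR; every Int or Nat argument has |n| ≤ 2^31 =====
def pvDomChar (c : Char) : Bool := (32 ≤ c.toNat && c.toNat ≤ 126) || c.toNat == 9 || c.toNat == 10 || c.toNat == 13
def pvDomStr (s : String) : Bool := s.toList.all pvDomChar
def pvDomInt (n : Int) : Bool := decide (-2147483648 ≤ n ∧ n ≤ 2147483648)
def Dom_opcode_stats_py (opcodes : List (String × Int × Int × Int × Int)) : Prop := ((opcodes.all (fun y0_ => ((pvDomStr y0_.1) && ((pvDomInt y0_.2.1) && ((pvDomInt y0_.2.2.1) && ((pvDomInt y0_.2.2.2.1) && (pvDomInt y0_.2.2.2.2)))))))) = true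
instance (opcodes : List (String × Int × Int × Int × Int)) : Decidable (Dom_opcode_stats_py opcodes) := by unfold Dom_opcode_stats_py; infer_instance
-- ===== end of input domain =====

-- B replaces A's single branching pass over a mutated dict with a dict literal of four
-- independent filtered sums, one per tag (simpler decomposition; same O(n) cost).

-- ===== PORT A =====
-- the body of A's for-loop, as a named step function (stats[tag] += x on a key known
-- to be present is insert of getD + x)
def opcodeStep (stats : PySem.Dict String Int) (p : String × Int × Int × Int × Int) :
    PySem.Dict String Int :=
  let tag := p.1; let i1 := p.2.1; let i2 := p.2.2.1; let j1 := p.2.2.2.1; let j2 := p.2.2.2.2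
  if stats.contains tag = false then stats            -- 'if tag not in stats: continue'
  else if tag == "equal" then stats.insert tag (stats.getD tag 0 + (i2 - i1))
  else if tag == "replace" then stats.insert tag (stats.getD tag 0 + max (i2 - i1) (j2 - j1))
  else stats.insert tag (stats.getD tag 0 + (if tag == "delete" then i2 - i1 else j2 - j1))

-- literal transliteration of A: dict initialized to four zeros, one mutating pass
def opcode_stats_py (opcodes : List (String × Int × Int × Int × Int)) : List (String × Int) :=
  let stats0 : PySem.Dict String Int :=
    PySem.Dict.ofList [("equal", 0), ("replace", 0), ("delete", 0), ("insert", 0)]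
  (opcodes.foldl opcodeStep stats0).items

-- ===== PORT B =====
def opcode_stats_py_alt (opcodes : List (String × Int × Int × Int × Int)) : List (String × Int) :=
  [("equal",   ((opcodes.filter (fun p => p.1 == "equal")).map (fun p => p.2.2.1 - p.2.1)).sum),
   ("replace", ((opcodes.filter (fun p => p.1 == "replace")).map (fun p => max (p.2.2.1 - p.2.1) (p.2.2.2.2 - p.2.2.2.1))).sum),
   ("delete",  ((opcodes.filter (fun p => p.1 == "delete")).map (fun p => p.2.2.1 - p.2.1)).sum),
   ("insert",  ((opcodes.filter (fun p => p.1 == "insert")).map (fun p => p.2.2.2.2 - p.2.2.2.1)).sum)]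

-- ===== PRECONDITION & SPEC =====
def Spec_opcode_stats_py (opcodes : List (String × Int × Int × Int × Int)) (out : List (String × Int)) : Prop := out = opcode_stats_py_alt opcodes
instance (opcodes : List (String × Int × Int × Int × Int)) (out : List (String × Int)) : Decidable (Spec_opcode_stats_py opcodes out) := by unfold Spec_opcode_stats_py; infer_instance

-- ===== CLAIM (what is proved, stated in full; the proofs are below) =====
def Claim_equal_opcode_stats_py : Prop := ∀ (opcodes : List (String × Int × Int × Int × Int)), Dom_opcode_stats_py opcodes → Spec_opcode_stats_py opcodes (opcode_stats_py opcodes)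

-- ===== LEMMAS AND PROOFS =====

theorem opcodeStep_equal (e r d i i1 i2 j1 j2 : Int) :
    opcodeStep (PySem.Dict.mk [("equal", e), ("replace", r), ("delete", d), ("insert", i)]) ("equal", i1, i2, j1, j2)
    = PySem.Dict.mk [("equal", e + (i2 - i1)), ("replace", r), ("delete", d), ("insert", i)] := by
  simp [opcodeStep, PySem.Dict.contains, PySem.Dict.insert, PySem.Dict.getD, PySem.Dict.get?]

theorem opcodeStep_replace (e r d i i1 i2 j1 j2 : Int) :
    opcodeStep (PySem.Dict.mk [("equal", e), ("replace", r), ("delete", d), ("insert", i)]) ("replace", i1, i2, j1, j2)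
    = PySem.Dict.mk [("equal", e), ("replace", r + max (i2 - i1) (j2 - j1)), ("delete", d), ("insert", i)] := by
  simp [opcodeStep, PySem.Dict.contains, PySem.Dict.insert, PySem.Dict.getD, PySem.Dict.get?]

theorem opcodeStep_delete (e r d i i1 i2 j1 j2 : Int) :
    opcodeStep (PySem.Dict.mk [("equal", e), ("replace", r), ("delete", d), ("insert", i)]) ("delete", i1, i2, j1, j2)
    = PySem.Dict.mk [("equal", e), ("replace", r), ("delete", d + (i2 - i1)), ("insert", i)] := by
  simp [opcodeStep, PySem.Dict.contains, PySem.Dict.insert, PySem.Dict.getD, PySem.Dict.get?]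

theorem opcodeStep_insert (e r d i i1 i2 j1 j2 : Int) :
    opcodeStep (PySem.Dict.mk [("equal", e), ("replace", r), ("delete", d), ("insert", i)]) ("insert", i1, i2, j1, j2)
    = PySem.Dict.mk [("equal", e), ("replace", r), ("delete", d), ("insert", i + (j2 - j1))] := by
  simp [opcodeStep, PySem.Dict.contains, PySem.Dict.insert, PySem.Dict.getD, PySem.Dict.get?]

theorem opcodeStep_other (e r d i i1 i2 j1 j2 : Int) (t : String)
    (h1 : t ≠ "equal") (h2 : t ≠ "replace") (h3 : t ≠ "delete") (h4 : t ≠ "insert") :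
    opcodeStep (PySem.Dict.mk [("equal", e), ("replace", r), ("delete", d), ("insert", i)]) (t, i1, i2, j1, j2)
    = PySem.Dict.mk [("equal", e), ("replace", r), ("delete", d), ("insert", i)] := by
  have hc : (PySem.Dict.mk [("equal", e), ("replace", r), ("delete", d), ("insert", i)]).contains t = false := by
    simp [PySem.Dict.contains]
    exact ⟨fun h => h1 h.symm, fun h => h2 h.symm, fun h => h3 h.symm, fun h => h4 h.symm⟩
  simp [opcodeStep, hc]

-- loop invariant: folding A's step over a literal four-key dict adds B's four filtered sums
theorem opcode_stats_fold_inv (l : List (String × Int × Int × Int × Int)) (e r d i : Int) :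
    l.foldl opcodeStep (PySem.Dict.mk [("equal", e), ("replace", r), ("delete", d), ("insert", i)]) =
    PySem.Dict.mk
      [("equal",   e + ((l.filter (fun p => p.1 == "equal")).map (fun p => p.2.2.1 - p.2.1)).sum),
       ("replace", r + ((l.filter (fun p => p.1 == "replace")).map (fun p => max (p.2.2.1 - p.2.1) (p.2.2.2.2 - p.2.2.2.1))).sum),
       ("delete",  d + ((l.filter (fun p => p.1 == "delete")).map (fun p => p.2.2.1 - p.2.1)).sum),
       ("insert",  i + ((l.filter (fun p => p.1 == "insert")).map (fun p => p.2.2.2.2 - p.2.2.2.1)).sum)] := by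
  induction l generalizing e r d i with
  | nil => simp
  | cons hd tl ih =>
    obtain ⟨t, i1, i2, j1, j2⟩ := hd
    rw [List.foldl_cons]
    by_cases h1 : t = "equal"
    · subst h1
      rw [opcodeStep_equal, ih]
      norm_num [List.filter_cons, add_assoc]; simp
    · by_cases h2 : t = "replace"
      · subst h2
        rw [opcodeStep_replace, ih]
        norm_num [List.filter_cons, add_assoc]; simp
      · by_cases h3 : t = "delete"
        · subst h3
          rw [opcodeStep_delete, ih]
          norm_num [List.filter_cons, add_assoc]; simp
        · by_cases h4 : t = "insert"
          · subst h4
            rw [opcodeStep_insert, ih]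
            norm_num [List.filter_cons, add_assoc]; simp
          · rw [opcodeStep_other e r d i i1 i2 j1 j2 t h1 h2 h3 h4, ih]
            norm_num [List.filter_cons, h1, h2, h3, h4]

-- ===== VERDICT (by name: the statement is the Claim_ definition above) =====
theorem opcode_stats_py_spec : Claim_equal_opcode_stats_py := by
  intro opcodes _
  show (opcodes.foldl opcodeStep
      (PySem.Dict.ofList [("equal", 0), ("replace", 0), ("delete", 0), ("insert", 0)])).items
    = opcode_stats_py_alt opcodes
  rw [show (PySem.Dict.ofList [("equal", (0:Int)), ("replace", 0), ("delete", 0), ("insert", 0)])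
      = PySem.Dict.mk [("equal", 0), ("replace", 0), ("delete", 0), ("insert", 0)] from by decide]
  rw [opcode_stats_fold_inv]
  simp [opcode_stats_py_alt]
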